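-- pv_equiv track=rewrite | github.com/kamilGie/WDI | Kolokwia/1A_2023/rozwiazanie1a2023.py | zgodne
-- ===== SOURCE A (Python) =====
-- def weryf(a, b):  # Funkcja weryfikuje, czy zadane dwie liczby są zgodne.
--     d = 2
--
--     while (
--         a > 1 and b > 1
--     ):  # w momencie, gdy którakolwiek liczba osiągnie 1 lub 0, nie będzie się dalej dzielić
--         if a % d == 0 and b % d == 0:
--             while a % d == 0:
--                 a //= d
--             while b % d == 0:
--                 b //= d
--         if (
--             a % d == 0 or b % d == 0
--         ):  # Jeśli poprzedni if się nie aktywował, a ten tak, wówczas jedna z liczb się dzieli, druga nie => nie są zgodne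
--             return False
--         d += 1
--
--     if (
--         a > 1 or b > 1
--     ):  # Jeśli zachodzi, któraś z liczb posiada czynnik 1szy, którego druga nie posiada.
--         return False
--     return True
--
-- def zgodne(T: list[int]):
--     l = len(T)
--     if l < 2:
--         return 0  # edge case: tablica pusta lub 1-elementowa nie może zawierać zgodnych sąsiadów
--     pom = [0] * l  # pom[i] określa, czy liczba T[i] ma zgodnego sąsiada
--
--     for i in range(l - 2):
--         if weryf(T[i], T[i + 1]):
--             pom[i] = pom[i + 1] = 1
--         if weryf(T[i], T[i + 2]):
--             pom[i] = pom[i + 2] = 1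
--
--     if weryf(T[-1], T[-2]):  # edge case: powyższy for nie porównuje 2 ostatnich liczb.
--         pom[-1] = pom[-2] = 1
--
--     return sum(
--         pom
--     )  # sumujemy zapisane jedynki,  każda reprezentuję liczbę mającą zgodnego sąsiada
-- ===== SOURCE B (Python) =====
-- def radical(n):
--     # ascending tuple of the distinct prime factors of n (empty for n <= 1)
--     fs = []
--     d = 2
--     while d * d <= n:
--         if n % d == 0:
--             fs.append(d)
--             while n % d == 0:
--                 n //= d
--         d += 1
--     if n > 1:
--         fs.append(n)
--     return tuple(fs)
--
--
-- def zgodne(T: list[int]):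
--     l = len(T)
--     if l < 2:
--         return 0
--     rads = [radical(x) for x in T]
--     cnt = 0
--     for i in range(l):
--         if any(0 <= j < l and rads[j] == rads[i] for j in (i - 2, i - 1, i + 1, i + 2)):
--             cnt += 1
--     return cnt
-- ===== Notes on version B (the rewrite author's own statement) =====
-- stated objective: faster
-- what changed: Replaces A's pairwise weryf test (simultaneous trial division of each neighbour pair, repeated for every pair) and 0/1 marking array by computing each element's radical once with sqrt-bounded trial division and counting indices whose distance-<=2 window contains an equal radical.
import Mathlib
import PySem

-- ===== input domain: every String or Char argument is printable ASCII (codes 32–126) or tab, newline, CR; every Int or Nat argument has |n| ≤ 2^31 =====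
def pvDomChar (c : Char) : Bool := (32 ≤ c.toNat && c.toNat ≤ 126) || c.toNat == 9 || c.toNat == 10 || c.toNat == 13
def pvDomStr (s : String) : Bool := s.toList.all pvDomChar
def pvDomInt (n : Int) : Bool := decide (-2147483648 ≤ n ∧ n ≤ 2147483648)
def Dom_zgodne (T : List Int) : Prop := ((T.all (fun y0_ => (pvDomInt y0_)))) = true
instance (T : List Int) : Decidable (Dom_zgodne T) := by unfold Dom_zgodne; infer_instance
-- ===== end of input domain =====

-- B replaces A's pairwise-factorisation test (weryf) plus marking array by one radical
-- (= ascending list of distinct prime factors) per element and a direct neighbour-window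
-- count; same return value, different decomposition (objective: alternative).

-- ===== PORT A =====

-- shared helper: Python's `while x % d == 0: x //= d` (its callers only reach it with
-- 0 < x and 2 ≤ d; the guards 2 ≤ d, 0 < x only make the Lean recursion total)
def pvDivOut (x d : Int) : Int :=
  if h : 2 ≤ d ∧ 0 < x ∧ PySem.Int.mod x d = 0 then pvDivOut (PySem.Int.floordiv x d) d else x
termination_by x.toNat
decreasing_by
  rcases h with ⟨hd, hx, hm⟩
  rw [PySem.Int.floordiv_eq_ediv_of_pos (by omega)]
  have hm0 : x % d = 0 := by rw [← PySem.Int.mod_eq_emod_of_pos (by omega)]; exact hm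
  have hx2 : x = d * (x / d) := by have := Int.emod_add_ediv x d; omega
  have hq1 : 1 ≤ x / d := by nlinarith [Int.ediv_nonneg (by omega : (0:Int) ≤ x) (by omega : (0:Int) ≤ d)]
  have h1 : x / d < x := by nlinarith
  omega

-- the `while a > 1 and b > 1` loop of weryf; fuel only makes the recursion structural,
-- weryf always supplies enough (proved below)
def pvWeryfLoop : Nat → Int → Int → Int → Bool
  | 0, _, _, _ => false
  | (f+1), a, b, d =>
    if 1 < a ∧ 1 < b then
      let ab := if PySem.Int.mod a d = 0 ∧ PySem.Int.mod b d = 0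
                then (pvDivOut a d, pvDivOut b d) else (a, b)
      if PySem.Int.mod ab.1 d = 0 ∨ PySem.Int.mod ab.2 d = 0 then false
      else pvWeryfLoop f ab.1 ab.2 (d+1)
    else !(decide (1 < a) || decide (1 < b))

def pvWeryf (a b : Int) : Bool := pvWeryfLoop (a.toNat + b.toNat + 2) a b 2

-- body of A's `for i in range(l-2)` loop (indices i, i+1, i+2 are all in range there,
-- so List.getD is exact for Python's T[i])
def pvStep (T : List Int) (pom : List Int) (i : Nat) : List Int :=
  let pomA := if pvWeryf (T.getD i 0) (T.getD (i+1) 0) then ((pom.set i 1).set (i+1) 1) else pom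
  if pvWeryf (T.getD i 0) (T.getD (i+2) 0) then ((pomA.set i 1).set (i+2) 1) else pomA

-- Python T[-1], T[-2] are T[l-1], T[l-2] (l ≥ 2 on that branch, so in range)
def zgodne (T : List Int) : Int :=
  let l := T.length
  if l < 2 then 0
  else
    let pom0 : List Int := List.replicate l 0
    let pom1 := (List.range (l - 2)).foldl (pvStep T) pom0
    let pom2 := if pvWeryf (T.getD (l-1) 0) (T.getD (l-2) 0)
                then ((pom1.set (l-1) 1).set (l-2) 1) else pom1
    pom2.sum

-- ===== PORT B =====

-- radical(n) of Source B: `while d*d <= n` trial division, then the prime cofactor;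
-- fuel only makes the recursion structural, pvRadical always supplies enough (proved below)
def pvRadLoop : Nat → Int → Int → List Int
  | 0, _, _ => []
  | (f+1), n, d =>
    if d * d ≤ n then
      if PySem.Int.mod n d = 0 then d :: pvRadLoop f (pvDivOut n d) (d+1)
      else pvRadLoop f n (d+1)
    else if 1 < n then [n] else []

def pvRadical (n : Int) : List Int := pvRadLoop (n.toNat + 2) n 2

def zgodne_alt (T : List Int) : Int :=
  let l := T.length
  if l < 2 then 0
  else
    let rads := T.map pvRadical
    (List.range l).foldl (fun (c : Int) (i : Nat) =>
      if [(i : Int) - 2, (i : Int) - 1, (i : Int) + 1, (i : Int) + 2].any (fun j =>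
            decide (0 ≤ j) && decide (j < (l : Int)) && (rads.getD j.toNat [] == rads.getD i []))
      then c + 1 else c) 0

-- ===== PRECONDITION & SPEC =====
def Spec_zgodne (T : List Int) (out : Int) : Prop := out = zgodne_alt T
instance (T : List Int) (out : Int) : Decidable (Spec_zgodne T out) := by unfold Spec_zgodne; infer_instance

-- ===== CLAIM (what is proved, stated in full; the proofs are below) =====
def Claim_equal_zgodne : Prop := ∀ (T : List Int), Dom_zgodne T → Spec_zgodne T (zgodne T)

-- ===== LEMMAS AND PROOFS =====

lemma pvFloordiv_facts (x d : Int) (hd : 2 ≤ d) (hx : 0 < x) :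
    0 ≤ PySem.Int.floordiv x d ∧ PySem.Int.floordiv x d < x ∧
    (PySem.Int.mod x d = 0 → 0 < PySem.Int.floordiv x d) := by
  rw [PySem.Int.floordiv_eq_ediv_of_pos (by omega)]
  have hnn : 0 ≤ x / d := Int.ediv_nonneg (by omega) (by omega)
  have hsplit : x % d + d * (x / d) = x := Int.emod_add_ediv x d
  have hr : 0 ≤ x % d := Int.emod_nonneg x (by omega)
  refine ⟨hnn, ?_, ?_⟩
  · rcases eq_or_lt_of_le hnn with h0 | h1
    · omega
    · nlinarith
  · intro hm
    have hm0 : x % d = 0 := by rw [← PySem.Int.mod_eq_emod_of_pos (by omega)]; exact hm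
    rcases eq_or_lt_of_le hnn with h0 | h1
    · nlinarith
    · exact h1

lemma pvDivOut_pos (x d : Int) (hx : 0 < x) : 0 < pvDivOut x d := by
  rw [pvDivOut]
  split_ifs with h
  · rcases h with ⟨hd, hx', hm⟩
    exact pvDivOut_pos _ d ((pvFloordiv_facts x d hd hx').2.2 hm)
  · exact hx
termination_by x.toNat
decreasing_by
  have := pvFloordiv_facts x d hd hx'
  omega

lemma pvDivOut_le (x d : Int) (hx : 0 < x) : pvDivOut x d ≤ x := by
  rw [pvDivOut]
  split_ifs with h
  · rcases h with ⟨hd, hx', hm⟩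
    have hf := pvFloordiv_facts x d hd hx'
    exact le_trans (pvDivOut_le _ d (hf.2.2 hm)) (by omega)
  · exact le_refl x
termination_by x.toNat
decreasing_by
  have := pvFloordiv_facts x d hd hx'
  omega

lemma pvDivOut_lt (x d : Int) (hd : 2 ≤ d) (hx : 0 < x) (hdvd : d ∣ x) : pvDivOut x d < x := by
  rw [pvDivOut]
  have hm : PySem.Int.mod x d = 0 := (PySem.Int.mod_eq_zero_iff_dvd x d).2 hdvd
  rw [dif_pos ⟨hd, hx, hm⟩]
  have hf := pvFloordiv_facts x d hd hx
  exact lt_of_le_of_lt (pvDivOut_le _ d (hf.2.2 hm)) hf.2.1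

lemma pvDivOut_dvd (x d : Int) : pvDivOut x d ∣ x := by
  rw [pvDivOut]
  split_ifs with h
  · rcases h with ⟨hd, hx', hm⟩
    have hq : PySem.Int.floordiv x d ∣ x := by
      rw [PySem.Int.floordiv_eq_ediv_of_pos (by omega)]
      have hm0 : x % d = 0 := by rw [← PySem.Int.mod_eq_emod_of_pos (by omega)]; exact hm
      have hsplit : x % d + d * (x / d) = x := Int.emod_add_ediv x d
      exact ⟨d, by rw [mul_comm]; omega⟩
    exact dvd_trans (pvDivOut_dvd _ d) hq
  · exact dvd_rfl
termination_by x.toNat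
decreasing_by
  have := pvFloordiv_facts x d hd hx'
  omega

lemma pvDivOut_not_dvd (x d : Int) (hd : 2 ≤ d) (hx : 0 < x) : ¬ (d ∣ pvDivOut x d) := by
  rw [pvDivOut]
  split_ifs with h
  · rcases h with ⟨_, hx', hm⟩
    exact pvDivOut_not_dvd _ d hd ((pvFloordiv_facts x d hd hx').2.2 hm)
  · intro hdvd
    exact h ⟨hd, hx, (PySem.Int.mod_eq_zero_iff_dvd x d).2 hdvd⟩
termination_by x.toNat
decreasing_by
  have := pvFloordiv_facts x d hd hx'
  omega

-- reference radical: same recursion as pvRadLoop but well-founded (guard d ≤ n)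
def sRad (n d : Int) : List Int :=
  if h : 1 < n ∧ 2 ≤ d ∧ d ≤ n then
    if PySem.Int.mod n d = 0 then d :: sRad (pvDivOut n d) (d+1) else sRad n (d+1)
  else []
termination_by (n.toNat + 1 - d.toNat)
decreasing_by
  · rcases h with ⟨hn, hd, hdn⟩
    have h1 : pvDivOut n d < n :=
      pvDivOut_lt n d hd (by omega) ((PySem.Int.mod_eq_zero_iff_dvd n d).1 (by assumption))
    have h2 : 0 < pvDivOut n d := pvDivOut_pos n d (by omega)
    omega
  · rcases h with ⟨hn, hd, hdn⟩
    omega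

-- "no divisor k with 2 ≤ k < d": invariant carried by all the loops
def NoF (n d : Int) : Prop := ∀ k : Int, 2 ≤ k → k < d → ¬ (k ∣ n)

lemma NoF_le (n d : Int) (hd : 2 ≤ d) (hn : 1 < n) (hI : NoF n d) : d ≤ n := by
  by_contra h
  exact hI n (by omega) (by omega) dvd_rfl

lemma NoF_step (n d : Int) (hd : 2 ≤ d) (hn : 0 < n) (hI : NoF n d) :
    NoF (pvDivOut n d) (d + 1) := by
  intro k hk2 hkd hdvd
  rcases lt_or_eq_of_le (by omega : k ≤ d) with h | h
  · exact hI k hk2 h (hdvd.trans (pvDivOut_dvd n d))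
  · exact pvDivOut_not_dvd n d hd hn (h ▸ hdvd)

lemma NoF_skip (n d : Int) (hI : NoF n d) (hnd : ¬ (d ∣ n)) : NoF n (d + 1) := by
  intro k hk2 hkd hdvd
  rcases lt_or_eq_of_le (by omega : k ≤ d) with h | h
  · exact hI k hk2 h hdvd
  · exact hnd (h ▸ hdvd)

lemma sRad_mem_ge (n d x : Int) (hx : x ∈ sRad n d) : d ≤ x := by
  rw [sRad] at hx
  by_cases h : 1 < n ∧ 2 ≤ d ∧ d ≤ n
  · rw [dif_pos h] at hx
    by_cases hm : PySem.Int.mod n d = 0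
    · rw [if_pos hm] at hx
      rcases List.mem_cons.1 hx with hx1 | hx1
      · omega
      · have := sRad_mem_ge _ _ x hx1
        omega
    · rw [if_neg hm] at hx
      have := sRad_mem_ge _ _ x hx
      omega
  · rw [dif_neg h] at hx
    simp at hx
termination_by (n.toNat + 1 - d.toNat)
decreasing_by
  · rcases h with ⟨hn, hd, hdn⟩
    have h1 : pvDivOut n d < n :=
      pvDivOut_lt n d hd (by omega) ((PySem.Int.mod_eq_zero_iff_dvd n d).1 hm)
    have h2 : 0 < pvDivOut n d := pvDivOut_pos n d (by omega)
    omega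
  · rcases h with ⟨hn, hd, hdn⟩
    omega

lemma sRad_ne_nil (n d : Int) (hd : 2 ≤ d) (hn : 1 < n) (hI : NoF n d) : sRad n d ≠ [] := by
  have hdn : d ≤ n := NoF_le n d hd hn hI
  rw [sRad, dif_pos ⟨hn, hd, hdn⟩]
  split_ifs with hm
  · simp
  · exact sRad_ne_nil n (d+1) (by omega) hn
      (NoF_skip n d hI (fun hdvd => hm ((PySem.Int.mod_eq_zero_iff_dvd n d).2 hdvd)))
termination_by (n.toNat + 1 - d.toNat)
decreasing_by
  omega

lemma sRad_of_le_one (n d : Int) (hn : ¬ 1 < n) : sRad n d = [] := by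
  rw [sRad]; simp [hn]

lemma pvDivOut_self (n : Int) (hn : 1 < n) : pvDivOut n n = 1 := by
  rw [pvDivOut, dif_pos ⟨by omega, by omega, (PySem.Int.mod_eq_zero_iff_dvd n n).2 dvd_rfl⟩]
  have h1 : PySem.Int.floordiv n n = 1 := by
    rw [PySem.Int.floordiv_eq_ediv_of_pos (by omega)]
    exact Int.ediv_self (by omega)
  rw [h1, pvDivOut, dif_neg]
  rintro ⟨h2, h3, h4⟩
  exact absurd (Int.le_of_dvd one_pos ((PySem.Int.mod_eq_zero_iff_dvd 1 n).1 h4)) (by omega)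

-- once no divisor below n is left, the radical is just [n]
lemma sRad_eq_self (n d : Int) (hd : 2 ≤ d) (hdn : d ≤ n)
    (hnd : ∀ k : Int, 2 ≤ k → k < n → ¬ (k ∣ n)) : sRad n d = [n] := by
  have hn : 1 < n := by omega
  rw [sRad, dif_pos ⟨hn, hd, hdn⟩]
  rcases eq_or_lt_of_le hdn with heq | hlt
  · subst heq
    rw [if_pos ((PySem.Int.mod_eq_zero_iff_dvd d d).2 dvd_rfl)]
    rw [pvDivOut_self d (by omega)]
    rw [sRad_of_le_one 1 (d+1) (by omega)]
  · have hm : ¬ PySem.Int.mod n d = 0 := fun h =>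
      hnd d hd hlt ((PySem.Int.mod_eq_zero_iff_dvd n d).1 h)
    rw [if_neg hm]
    exact sRad_eq_self n (d+1) (by omega) (by omega) hnd
termination_by (n.toNat + 1 - d.toNat)
decreasing_by omega

-- past the square root with no divisor found, n has no nontrivial divisor at all
lemma no_div_of_past_sqrt (n d : Int) (hd : 2 ≤ d) (hn : 1 < n) (hI : NoF n d)
    (hdd : ¬ d * d ≤ n) : ∀ k : Int, 2 ≤ k → k < n → ¬ (k ∣ n) := by
  intro k hk2 hkn hdvd
  by_cases hkd : k < d
  · exact hI k hk2 hkd hdvd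
  · obtain ⟨m, hm⟩ := hdvd
    have hm0 : 0 < m := by nlinarith
    have hm1 : m ≠ 1 := fun h => by rw [h, mul_one] at hm; omega
    have hlt2 : k * m < d * d := by rw [← hm]; omega
    have hle2 : d * d ≤ k * d := by nlinarith
    have hmd : m < d := lt_of_mul_lt_mul_left (by omega) (by omega : (0:Int) ≤ k)
    exact hI m (by omega) hmd ⟨k, by rw [hm]; ring⟩

-- fuel sufficiency for B's radical loop
lemma pvRadLoop_eq_sRad (f : Nat) (n d : Int) (hd : 2 ≤ d) (hI : NoF n d)
    (hf : n.toNat + 1 - d.toNat < f) : pvRadLoop f n d = sRad n d := by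
  induction f generalizing n d with
  | zero => omega
  | succ f ih =>
    rw [pvRadLoop]
    by_cases hdd : d * d ≤ n
    · have hn : 1 < n := by nlinarith
      have hdn : d ≤ n := by nlinarith
      rw [if_pos hdd, sRad, dif_pos ⟨hn, hd, hdn⟩]
      split_ifs with hm
      · have hdvd : d ∣ n := (PySem.Int.mod_eq_zero_iff_dvd n d).1 hm
        have h1 : pvDivOut n d < n := pvDivOut_lt n d hd (by omega) hdvd
        have h2 : 0 < pvDivOut n d := pvDivOut_pos n d (by omega)
        rw [ih _ _ (by omega) (NoF_step n d hd (by omega) hI) (by omega)]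
      · rw [ih _ _ (by omega)
          (NoF_skip n d hI (fun hdvd => hm ((PySem.Int.mod_eq_zero_iff_dvd n d).2 hdvd)))
          (by omega)]
    · rw [if_neg hdd]
      by_cases hn : 1 < n
      · rw [if_pos hn]
        have hdn : d ≤ n := NoF_le n d hd hn hI
        exact (sRad_eq_self n d hd hdn (no_div_of_past_sqrt n d hd hn hI hdd)).symm
      · rw [if_neg hn, sRad_of_le_one n d hn]

lemma pvRadical_eq_sRad (n : Int) : pvRadical n = sRad n 2 := by
  exact pvRadLoop_eq_sRad _ _ _ (by omega) (fun k hk2 hkd => by omega) (by omega)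

-- the crux: weryf answers "equal radicals"
lemma pvWeryfLoop_eq (f : Nat) (a b d : Int) (hd : 2 ≤ d) (hIa : NoF a d) (hIb : NoF b d)
    (hf : (a.toNat + 1 - d.toNat) + (b.toNat + 1 - d.toNat) < f) :
    pvWeryfLoop f a b d = (sRad a d == sRad b d) := by
  induction f generalizing a b d with
  | zero => omega
  | succ f ih =>
    rw [pvWeryfLoop]
    by_cases hab : 1 < a ∧ 1 < b
    · rw [if_pos hab]
      obtain ⟨ha, hb⟩ := hab
      have hda : d ≤ a := NoF_le a d hd ha hIa
      have hdb : d ≤ b := NoF_le b d hd hb hIb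
      by_cases hm : PySem.Int.mod a d = 0 ∧ PySem.Int.mod b d = 0
      · simp only [if_pos hm]
        have hma : ¬ PySem.Int.mod (pvDivOut a d) d = 0 := fun h =>
          pvDivOut_not_dvd a d hd (by omega) ((PySem.Int.mod_eq_zero_iff_dvd _ d).1 h)
        have hmb : ¬ PySem.Int.mod (pvDivOut b d) d = 0 := fun h =>
          pvDivOut_not_dvd b d hd (by omega) ((PySem.Int.mod_eq_zero_iff_dvd _ d).1 h)
        rw [if_neg (by simp [hma, hmb])]
        have h1a : pvDivOut a d < a := pvDivOut_lt a d hd (by omega)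
          ((PySem.Int.mod_eq_zero_iff_dvd a d).1 hm.1)
        have h2a : 0 < pvDivOut a d := pvDivOut_pos a d (by omega)
        have h1b : pvDivOut b d < b := pvDivOut_lt b d hd (by omega)
          ((PySem.Int.mod_eq_zero_iff_dvd b d).1 hm.2)
        have h2b : 0 < pvDivOut b d := pvDivOut_pos b d (by omega)
        rw [ih _ _ _ (by omega) (NoF_step a d hd (by omega) hIa)
          (NoF_step b d hd (by omega) hIb) (by omega)]
        rw [show sRad a d = d :: sRad (pvDivOut a d) (d+1) by
          rw [sRad, dif_pos ⟨ha, hd, hda⟩, if_pos hm.1]]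
        rw [show sRad b d = d :: sRad (pvDivOut b d) (d+1) by
          rw [sRad, dif_pos ⟨hb, hd, hdb⟩, if_pos hm.2]]
        simp
      · rw [if_neg hm]
        by_cases hor : PySem.Int.mod a d = 0 ∨ PySem.Int.mod b d = 0
        · rw [if_pos hor]
          have hne : sRad a d ≠ sRad b d := by
            rcases hor with hma | hmb
            · have hmb : ¬ PySem.Int.mod b d = 0 := fun h => hm ⟨hma, h⟩
              rw [sRad, dif_pos ⟨ha, hd, hda⟩, if_pos hma]
              rw [show sRad b d = sRad b (d+1) by
                rw [sRad, dif_pos ⟨hb, hd, hdb⟩, if_neg hmb]]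
              intro hcontra
              have : d ∈ sRad b (d+1) := by rw [← hcontra]; exact List.mem_cons_self
              have := sRad_mem_ge b (d+1) d this
              omega
            · have hma : ¬ PySem.Int.mod a d = 0 := fun h => hm ⟨h, hmb⟩
              rw [show sRad a d = sRad a (d+1) by
                rw [sRad, dif_pos ⟨ha, hd, hda⟩, if_neg hma]]
              rw [show sRad b d = d :: sRad (pvDivOut b d) (d+1) by
                rw [sRad, dif_pos ⟨hb, hd, hdb⟩, if_pos hmb]]
              intro hcontra
              have : d ∈ sRad a (d+1) := by rw [hcontra]; exact List.mem_cons_self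
              have := sRad_mem_ge a (d+1) d this
              omega
          simp [beq_eq_false_iff_ne, hne]
        · rw [if_neg hor]
          push_neg at hor
          have hnda : ¬ (d ∣ a) := fun h => hor.1 ((PySem.Int.mod_eq_zero_iff_dvd a d).2 h)
          have hndb : ¬ (d ∣ b) := fun h => hor.2 ((PySem.Int.mod_eq_zero_iff_dvd b d).2 h)
          rw [ih _ _ _ (by omega) (NoF_skip a d hIa hnda) (NoF_skip b d hIb hndb) (by omega)]
          rw [show sRad a d = sRad a (d+1) by
            rw [sRad, dif_pos ⟨ha, hd, hda⟩, if_neg hor.1]]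
          rw [show sRad b d = sRad b (d+1) by
            rw [sRad, dif_pos ⟨hb, hd, hdb⟩, if_neg hor.2]]
    · rw [if_neg hab]
      by_cases ha : 1 < a
      · have hb : ¬ 1 < b := fun h => hab ⟨ha, h⟩
        have h1 := sRad_ne_nil a d hd ha hIa
        rw [sRad_of_le_one b d hb]
        simp [ha, hb, beq_eq_false_iff_ne, h1]
      · by_cases hb : 1 < b
        · have h1 := sRad_ne_nil b d hd hb hIb
          rw [sRad_of_le_one a d ha]
          simp [ha, hb]
          exact fun h => h1 h
        · rw [sRad_of_le_one a d ha, sRad_of_le_one b d hb]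
          simp [ha, hb]

lemma pvWeryf_eq (a b : Int) : pvWeryf a b = (pvRadical a == pvRadical b) := by
  rw [pvRadical_eq_sRad, pvRadical_eq_sRad]
  exact pvWeryfLoop_eq _ a b 2 (by omega) (fun k h1 h2 => by omega) (fun k h1 h2 => by omega)
    (by omega)

-- ========== combinatorial part ==========

-- i is covered by some pair (p,p+1) or (p,p+2) with p < k that weryf accepts
def coveredb (T : List Int) (k i : Nat) : Bool :=
  decide (∃ p, p < k ∧
    (((i = p ∨ i = p + 1) ∧ pvWeryf (T.getD p 0) (T.getD (p+1) 0) = true) ∨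
     ((i = p ∨ i = p + 2) ∧ pvWeryf (T.getD p 0) (T.getD (p+2) 0) = true)))

-- overall predicate A marks
def okAb (T : List Int) (i : Nat) : Bool :=
  coveredb T (T.length - 2) i ||
    (decide (i = T.length - 1 ∨ i = T.length - 2) &&
      pvWeryf (T.getD (T.length - 1) 0) (T.getD (T.length - 2) 0))

-- predicate B counts
def okB (T : List Int) (i : Nat) : Bool :=
  [(i : Int) - 2, (i : Int) - 1, (i : Int) + 1, (i : Int) + 2].any (fun j =>
    decide (0 ≤ j) && decide (j < (T.length : Int)) &&
      ((T.map pvRadical).getD j.toNat [] == (T.map pvRadical).getD i []))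

lemma okAb_iff (T : List Int) (i : Nat) : okAb T i = true ↔
    (coveredb T (T.length - 2) i = true ∨
      ((i = T.length - 1 ∨ i = T.length - 2) ∧
        pvWeryf (T.getD (T.length - 1) 0) (T.getD (T.length - 2) 0) = true)) := by
  simp [okAb, Bool.or_eq_true, Bool.and_eq_true, decide_eq_true_eq]

lemma coveredb_zero (T : List Int) (i : Nat) : coveredb T 0 i = false := by
  apply decide_eq_false
  rintro ⟨p, hp, -⟩
  exact absurd hp (Nat.not_lt_zero p)

lemma coveredb_succ (T : List Int) (k i : Nat) :
    coveredb T (k+1) i = true ↔ (coveredb T k i = true ∨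
      ((i = k ∨ i = k+1) ∧ pvWeryf (T.getD k 0) (T.getD (k+1) 0) = true) ∨
      ((i = k ∨ i = k+2) ∧ pvWeryf (T.getD k 0) (T.getD (k+2) 0) = true)) := by
  simp only [coveredb, decide_eq_true_eq]
  constructor
  · rintro ⟨p, hp, h⟩
    rcases Nat.lt_or_ge p k with hpk | hpk
    · exact Or.inl ⟨p, hpk, h⟩
    · have : p = k := by omega
      subst this
      rcases h with h | h
      · exact Or.inr (Or.inl h)
      · exact Or.inr (Or.inr h)
  · rintro (⟨p, hp, h⟩ | h | h)
    · exact ⟨p, by omega, h⟩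
    · exact ⟨k, by omega, Or.inl h⟩
    · exact ⟨k, by omega, Or.inr h⟩

lemma getD_map_radical (T : List Int) (j : Nat) (hj : j < T.length) :
    (T.map pvRadical).getD j [] = pvRadical (T.getD j 0) := by
  simp [List.getD_eq_getElem?_getD, List.getElem?_map, List.getElem?_eq_getElem hj]

lemma getD_set' (L : List Int) (i j : Nat) (v : Int) :
    (L.set i v).getD j 0 = if i = j ∧ j < L.length then v else L.getD j 0 := by
  simp only [List.getD_eq_getElem?_getD, List.getElem?_set]
  by_cases h1 : i = j
  · subst h1
    by_cases h2 : i < L.length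
    · simp [h2]
    · rw [if_pos rfl, if_neg h2, if_neg (fun hc => h2 hc.2)]
      simp [List.getElem?_eq_none (by omega : L.length ≤ i)]
  · rw [if_neg h1, if_neg (fun hc => h1 hc.1)]

-- invariant of A's marking fold
lemma foldA_inv (T : List Int) (k : Nat) (hk : k ≤ T.length - 2) (hl : 2 ≤ T.length) :
    ((List.range k).foldl (pvStep T) (List.replicate T.length 0)).length = T.length ∧
    ∀ i, ((List.range k).foldl (pvStep T) (List.replicate T.length 0)).getD i 0 =
      if coveredb T k i then 1 else 0 := by
  induction k with
  | zero =>
    refine ⟨by simp, fun i => ?_⟩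
    rw [coveredb_zero, if_neg (by simp)]
    by_cases hi : i < T.length
    · simp [List.getD_eq_getElem?_getD, List.getElem?_eq_getElem (by simpa using hi)]
    · simp [List.getD_eq_getElem?_getD,
        List.getElem?_eq_none (by simpa using (by omega : T.length ≤ i))]
  | succ k ih =>
    obtain ⟨hlen, hval⟩ := ih (by omega)
    rw [List.range_succ, List.foldl_append, List.foldl_cons, List.foldl_nil]
    have hk2 : k + 2 < T.length := by omega
    refine ⟨by simp only [pvStep]; split_ifs <;> simp [hlen], fun i => ?_⟩
    simp only [pvStep]
    by_cases hw1 : pvWeryf (T.getD k 0) (T.getD (k+1) 0) = true <;>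
      by_cases hw2 : pvWeryf (T.getD k 0) (T.getD (k+2) 0) = true
    · rw [if_pos hw1, if_pos hw2, getD_set', getD_set', getD_set', getD_set']
      simp only [List.length_set, hlen]
      by_cases h1 : i = k
      · rw [if_neg (by omega), if_pos (show k = i ∧ i < T.length by omega),
          if_pos ((coveredb_succ T k i).2 (Or.inr (Or.inl ⟨Or.inl h1, hw1⟩)))]
      · by_cases h2 : i = k + 1
        · rw [if_neg (by omega), if_neg (by omega),
            if_pos (show k + 1 = i ∧ i < T.length by omega),
            if_pos ((coveredb_succ T k i).2 (Or.inr (Or.inl ⟨Or.inr h2, hw1⟩)))]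
        · by_cases h3 : i = k + 2
          · rw [if_pos (show k + 2 = i ∧ i < T.length by omega),
              if_pos ((coveredb_succ T k i).2 (Or.inr (Or.inr ⟨Or.inr h3, hw2⟩)))]
          · rw [if_neg (by omega), if_neg (by omega), if_neg (by omega), if_neg (by omega),
              hval i]
            refine if_congr ?_ rfl rfl
            constructor
            · intro h; exact (coveredb_succ T k i).2 (Or.inl h)
            · intro h
              rcases (coveredb_succ T k i).1 h with h' | ⟨hip, _⟩ | ⟨hip, _⟩
              · exact h'
              · omega
              · omega
    · rw [if_pos hw1, if_neg hw2, getD_set', getD_set']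
      simp only [List.length_set, hlen]
      by_cases h1 : i = k
      · rw [if_neg (by omega), if_pos (show k = i ∧ i < T.length by omega),
          if_pos ((coveredb_succ T k i).2 (Or.inr (Or.inl ⟨Or.inl h1, hw1⟩)))]
      · by_cases h2 : i = k + 1
        · rw [if_pos (show k + 1 = i ∧ i < T.length by omega),
            if_pos ((coveredb_succ T k i).2 (Or.inr (Or.inl ⟨Or.inr h2, hw1⟩)))]
        · rw [if_neg (by omega), if_neg (by omega), hval i]
          refine if_congr ?_ rfl rfl
          constructor
          · intro h; exact (coveredb_succ T k i).2 (Or.inl h)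
          · intro h
            rcases (coveredb_succ T k i).1 h with h' | ⟨hip, _⟩ | ⟨hip, hww⟩
            · exact h'
            · omega
            · exact absurd hww hw2
    · rw [if_neg hw1, if_pos hw2, getD_set', getD_set']
      simp only [List.length_set, hlen]
      by_cases h1 : i = k
      · rw [if_neg (by omega), if_pos (show k = i ∧ i < T.length by omega),
          if_pos ((coveredb_succ T k i).2 (Or.inr (Or.inr ⟨Or.inl h1, hw2⟩)))]
      · by_cases h3 : i = k + 2
        · rw [if_pos (show k + 2 = i ∧ i < T.length by omega),
            if_pos ((coveredb_succ T k i).2 (Or.inr (Or.inr ⟨Or.inr h3, hw2⟩)))]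
        · rw [if_neg (by omega), if_neg (by omega), hval i]
          refine if_congr ?_ rfl rfl
          constructor
          · intro h; exact (coveredb_succ T k i).2 (Or.inl h)
          · intro h
            rcases (coveredb_succ T k i).1 h with h' | ⟨hip, hww⟩ | ⟨hip, _⟩
            · exact h'
            · exact absurd hww hw1
            · omega
    · rw [if_neg hw1, if_neg hw2, hval i]
      refine if_congr ?_ rfl rfl
      constructor
      · intro h; exact (coveredb_succ T k i).2 (Or.inl h)
      · intro h
        rcases (coveredb_succ T k i).1 h with h' | ⟨hip, hww⟩ | ⟨hip, hww⟩
        · exact h'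
        · exact absurd hww hw1
        · exact absurd hww hw2

lemma pvWeryf_true_iff (a b : Int) : pvWeryf a b = true ↔ pvRadical a = pvRadical b := by
  rw [pvWeryf_eq]; exact beq_iff_eq

lemma okAb_iff_okB (T : List Int) (hl : 2 ≤ T.length) (i : Nat) (hi : i < T.length) :
    okAb T i = true ↔ okB T i = true := by
  have hM : ∀ j, j < T.length → (T.map pvRadical).getD j [] = pvRadical (T.getD j 0) :=
    fun j hj => getD_map_radical T j hj
  have e1 : ((i:Int) - 2).toNat = i - 2 := by omega
  have e2 : ((i:Int) - 1).toNat = i - 1 := by omega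
  have e3 : ((i:Int) + 1).toNat = i + 1 := by omega
  have e4 : ((i:Int) + 2).toNat = i + 2 := by omega
  rw [okAb_iff]
  simp only [coveredb, decide_eq_true_eq]
  simp only [okB, List.any_cons, List.any_nil, Bool.or_eq_true, Bool.and_eq_true,
    decide_eq_true_eq, beq_iff_eq, e1, e2, e3, e4, Bool.or_false]
  constructor
  · rintro (⟨p, hp, ⟨hip, hw⟩ | ⟨hip, hw⟩⟩ | ⟨hip, hw⟩)
    · rw [pvWeryf_true_iff] at hw
      rcases hip with rfl | rfl
      · refine Or.inr (Or.inr (Or.inl ⟨⟨by omega, by omega⟩, ?_⟩))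
        rw [hM (i+1) (by omega), hM i (by omega)]
        exact hw.symm
      · refine Or.inr (Or.inl ⟨⟨by omega, by omega⟩, ?_⟩)
        have hidx : p + 1 - 1 = p := by omega
        rw [hidx, hM p (by omega), hM (p+1) (by omega)]
        exact hw
    · rw [pvWeryf_true_iff] at hw
      rcases hip with rfl | rfl
      · refine Or.inr (Or.inr (Or.inr ⟨⟨by omega, by omega⟩, ?_⟩))
        rw [hM (i+2) (by omega), hM i (by omega)]
        exact hw.symm
      · refine Or.inl ⟨⟨by omega, by omega⟩, ?_⟩
        have hidx : p + 2 - 2 = p := by omega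
        rw [hidx, hM p (by omega), hM (p+2) (by omega)]
        exact hw
    · rw [pvWeryf_true_iff] at hw
      rcases hip with rfl | rfl
      · refine Or.inr (Or.inl ⟨⟨by omega, by omega⟩, ?_⟩)
        have hidx : T.length - 1 - 1 = T.length - 2 := by omega
        rw [hidx, hM (T.length - 2) (by omega), hM (T.length - 1) (by omega)]
        exact hw.symm
      · refine Or.inr (Or.inr (Or.inl ⟨⟨by omega, by omega⟩, ?_⟩))
        have hidx : T.length - 2 + 1 = T.length - 1 := by omega
        rw [hidx, hM (T.length - 1) (by omega), hM (T.length - 2) (by omega)]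
        exact hw
  · rintro (⟨⟨hb1, hb2⟩, hr⟩ | ⟨⟨hb1, hb2⟩, hr⟩ | ⟨⟨hb1, hb2⟩, hr⟩ | ⟨⟨hb1, hb2⟩, hr⟩)
    · -- j = i - 2
      rw [hM (i-2) (by omega), hM i (by omega)] at hr
      refine Or.inl ⟨i - 2, by omega, Or.inr ⟨Or.inr (by omega), ?_⟩⟩
      rw [pvWeryf_true_iff]
      have hidx : i - 2 + 2 = i := by omega
      rw [hidx]
      exact hr
    · -- j = i - 1
      rw [hM (i-1) (by omega), hM i (by omega)] at hr
      by_cases hc : i - 1 < T.length - 2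
      · refine Or.inl ⟨i - 1, hc, Or.inl ⟨Or.inr (by omega), ?_⟩⟩
        rw [pvWeryf_true_iff]
        have hidx : i - 1 + 1 = i := by omega
        rw [hidx]
        exact hr
      · have hieq : i = T.length - 1 := by omega
        refine Or.inr ⟨Or.inl hieq, ?_⟩
        rw [pvWeryf_true_iff]
        have h1 : T.length - 1 = i := hieq.symm
        have h2 : T.length - 2 = i - 1 := by omega
        rw [h1, h2]
        exact hr.symm
    · -- j = i + 1
      rw [hM (i+1) (by omega), hM i (by omega)] at hr
      by_cases hc : i < T.length - 2
      · refine Or.inl ⟨i, hc, Or.inl ⟨Or.inl rfl, ?_⟩⟩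
        rw [pvWeryf_true_iff]
        exact hr.symm
      · have hieq : i = T.length - 2 := by omega
        refine Or.inr ⟨Or.inr hieq, ?_⟩
        rw [pvWeryf_true_iff]
        have h1 : T.length - 1 = i + 1 := by omega
        have h2 : T.length - 2 = i := hieq.symm
        rw [h1, h2]
        exact hr
    · -- j = i + 2
      rw [hM (i+2) (by omega), hM i (by omega)] at hr
      refine Or.inl ⟨i, by omega, Or.inr ⟨Or.inl rfl, ?_⟩⟩
      rw [pvWeryf_true_iff]
      exact hr.symm

lemma pom2_spec (T : List Int) (hl : 2 ≤ T.length) :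
    (if pvWeryf (T.getD (T.length - 1) 0) (T.getD (T.length - 2) 0)
     then ((((List.range (T.length - 2)).foldl (pvStep T) (List.replicate T.length 0)).set
              (T.length - 1) 1).set (T.length - 2) 1)
     else ((List.range (T.length - 2)).foldl (pvStep T) (List.replicate T.length 0))) =
    (List.range T.length).map (fun i => if okAb T i then (1 : Int) else 0) := by
  obtain ⟨hlen, hval⟩ := foldA_inv T (T.length - 2) (le_refl _) hl
  split_ifs with hw
  · apply List.ext_getElem (by simp [hlen])
    intro i h1 h2
    have hi : i < T.length := by simpa [hlen] using h1
    rw [← List.getD_eq_getElem _ 0 h1, getD_set', getD_set']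
    simp only [List.length_set, hlen]
    rw [List.getElem_map, List.getElem_range]
    by_cases hi1 : i = T.length - 1
    · rw [if_neg (by omega), if_pos (show T.length - 1 = i ∧ i < T.length by omega),
        if_pos ((okAb_iff T i).2 (Or.inr ⟨Or.inl hi1, hw⟩))]
    · by_cases hi2 : i = T.length - 2
      · rw [if_pos (show T.length - 2 = i ∧ i < T.length by omega),
          if_pos ((okAb_iff T i).2 (Or.inr ⟨Or.inr hi2, hw⟩))]
      · rw [if_neg (by omega), if_neg (by omega), hval i]
        refine if_congr ?_ rfl rfl
        constructor
        · intro h; exact (okAb_iff T i).2 (Or.inl h)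
        · intro h
          rcases (okAb_iff T i).1 h with h' | ⟨hip, _⟩
          · exact h'
          · omega
  · apply List.ext_getElem (by simp [hlen])
    intro i h1 h2
    have hi : i < T.length := by simpa [hlen] using h1
    rw [← List.getD_eq_getElem _ 0 h1, hval i, List.getElem_map, List.getElem_range]
    refine if_congr ?_ rfl rfl
    constructor
    · intro h; exact (okAb_iff T i).2 (Or.inl h)
    · intro h
      rcases (okAb_iff T i).1 h with h' | ⟨-, hww⟩
      · exact h'
      · exact absurd hww hw

lemma zgodneA_eq (T : List Int) (hl : 2 ≤ T.length) :
    zgodne T = ((List.range T.length).countP (okAb T) : Int) := by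
  simp only [zgodne]
  rw [if_neg (by omega : ¬ T.length < 2)]
  rw [pom2_spec T hl]
  rw [PySem.List.sum_map_ite_one_zero]

lemma zgodneB_eq (T : List Int) (hl : 2 ≤ T.length) :
    zgodne_alt T = ((List.range T.length).countP (okB T) : Int) := by
  simp only [zgodne_alt]
  rw [if_neg (by omega : ¬ T.length < 2)]
  show (List.range T.length).foldl (fun c i => if okB T i = true then c + 1 else c) 0 = _
  rw [PySem.List.foldl_count_if (okB T) (List.range T.length) 0]
  simp

-- ===== VERDICT (by name: the statement is the Claim_ definition above) =====
theorem zgodne_spec : Claim_equal_zgodne := by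
  intro T _
  unfold Spec_zgodne
  by_cases hlt : T.length < 2
  · simp [zgodne, zgodne_alt, hlt]
  · have hl : 2 ≤ T.length := by omega
    rw [zgodneA_eq T hl, zgodneB_eq T hl]
    congr 1
    apply List.countP_congr
    intro i hi
    exact okAb_iff_okB T hl i (List.mem_range.1 hi)
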